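-- pv_equiv track=rewrite | github.com/achufistov/yara-gtfo | app/main.py | parse_exploit_info
-- ===== SOURCE A (Python) =====
-- def parse_exploit_info(exploit_info):
--     categories = {}
--     current_category = None
--     lines = exploit_info.split("\n")
--
--     for line in lines:
--         line = line.strip()
--         if line in ["Shell", "SUID", "Sudo"]:
--             current_category = line
--             categories[current_category] = []
--         elif line and current_category:
--             categories[current_category].append(line)
--
--     return categories
-- ===== SOURCE B (Python) =====
-- def parse_exploit_info(exploit_info):
--     HEADERS = ("Shell", "SUID", "Sudo")
--     stripped = [ln.strip() for ln in exploit_info.split("\n")]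
--     categories = {}
--     i = 0
--     n = len(stripped)
--     while i < n:
--         if stripped[i] in HEADERS:
--             header = stripped[i]
--             body = []
--             i += 1
--             while i < n and stripped[i] not in HEADERS:
--                 if stripped[i]:
--                     body.append(stripped[i])
--                 i += 1
--             categories[header] = body
--         else:
--             i += 1
--     return categories
-- ===== Notes on version B (the rewrite author's own statement) =====
-- stated objective: alternative
-- what changed: Replaces A's single pass with a current-category mode flag (appending line by line into the dict entry) by an index-based segment scan: skip the preamble, and for each header occurrence consume its whole body with an inner loop and assign the filtered list once (last occurrence wins).
import Mathlib
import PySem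

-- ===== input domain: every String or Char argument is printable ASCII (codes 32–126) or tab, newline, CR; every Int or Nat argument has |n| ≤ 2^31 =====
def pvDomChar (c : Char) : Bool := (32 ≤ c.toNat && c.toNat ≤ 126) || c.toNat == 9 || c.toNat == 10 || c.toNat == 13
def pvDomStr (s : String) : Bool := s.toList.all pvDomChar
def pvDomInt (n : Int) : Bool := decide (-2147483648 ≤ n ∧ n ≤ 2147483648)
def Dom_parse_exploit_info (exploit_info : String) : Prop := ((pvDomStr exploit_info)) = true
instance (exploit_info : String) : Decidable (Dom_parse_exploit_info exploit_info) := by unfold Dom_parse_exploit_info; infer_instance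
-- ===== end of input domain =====

-- B replaces A's mode-flag line loop by a segment scan (skip preamble; per header, consume the
-- whole body and assign it once): same result, a different decomposition (objective: alternative).

-- ===== PORT A =====
-- A: one pass over the lines with a current-category flag (state = (categories, current_category)),
-- appending each kept line into the dict entry of the current category.
def pvStepA (st : PySem.Dict String (List String) × Option String) (line : String) :
    PySem.Dict String (List String) × Option String :=
  let line := PySem.Str.strip line
  if line = "Shell" ∨ line = "SUID" ∨ line = "Sudo" then
    (st.1.insert line [], some line)
  else if line ≠ "" then
    match st.2 with
    | some c => (st.1.modify c [] (· ++ [line]), st.2)   -- categories[current_category].append(line)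
    | none => st
  else st

def parse_exploit_info (exploit_info : String) : List (String × List String) :=
  let lines := (PySem.Str.split? exploit_info "\n").getD []   -- sep "\n" ≠ "": split? is some here
  (lines.foldl pvStepA (PySem.Dict.empty, none)).1.items

-- ===== PORT B =====
def pvIsHeader (s : String) : Bool := s = "Shell" ∨ s = "SUID" ∨ s = "Sudo"

-- B's inner while-loop: scan the body lines after a header, keeping the non-empty ones;
-- returns (body, remaining lines starting at the next header or the end).
def pvBody : List String → List String × List String
  | [] => ([], [])
  | s :: t =>
    if pvIsHeader s then ([], s :: t)
    else
      let r := pvBody t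
      (if s ≠ "" then s :: r.1 else r.1, r.2)

theorem pvBody_len : ∀ t : List String, (pvBody t).2.length ≤ t.length := by
  intro t
  induction t with
  | nil => simp [pvBody]
  | cons s t ih =>
    simp only [pvBody]
    split
    · simp
    · simpa using Nat.le_succ_of_le ih

-- B's outer while-loop over the stripped lines.
def pvGo : List String → PySem.Dict String (List String) → PySem.Dict String (List String)
  | [], d => d
  | s :: t, d =>
    if pvIsHeader s then
      pvGo (pvBody t).2 (d.insert s (pvBody t).1)
    else pvGo t d
termination_by ls _ => ls.length
decreasing_by
  · exact Nat.lt_succ_of_le (pvBody_len t)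
  · simp

def parse_exploit_info_alt (exploit_info : String) : List (String × List String) :=
  let stripped := ((PySem.Str.split? exploit_info "\n").getD []).map PySem.Str.strip
  (pvGo stripped PySem.Dict.empty).items

-- ===== PRECONDITION & SPEC =====
def Spec_parse_exploit_info (exploit_info : String) (out : List (String × List String)) : Prop := out = parse_exploit_info_alt exploit_info
instance (exploit_info : String) (out : List (String × List String)) : Decidable (Spec_parse_exploit_info exploit_info out) := by unfold Spec_parse_exploit_info; infer_instance

-- ===== CLAIM (what is proved, stated in full; the proofs are below) =====
def Claim_equal_parse_exploit_info : Prop := ∀ (exploit_info : String), Dom_parse_exploit_info exploit_info → Spec_parse_exploit_info exploit_info (parse_exploit_info exploit_info)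

-- ===== LEMMAS AND PROOFS =====

-- A's loop in the "inside category h, whose entry so far is acc" state equals B's segment step:
-- consume the body of h at once, then continue at the next header (or the end).
theorem pvL2 : ∀ (ls : List String) (d : PySem.Dict String (List String)) (h acc : _),
    (ls.foldl pvStepA (d.insert h acc, some h)).1
      = pvGo (pvBody (ls.map PySem.Str.strip)).2
          (d.insert h (acc ++ (pvBody (ls.map PySem.Str.strip)).1)) := by
  intro ls
  induction ls with
  | nil => intro d h acc; simp [pvBody, pvGo]
  | cons s t ih =>
    intro d h acc
    simp only [List.foldl_cons, List.map_cons, pvStepA, pvBody]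
    by_cases hh : PySem.Str.strip s = "Shell" ∨ PySem.Str.strip s = "SUID" ∨ PySem.Str.strip s = "Sudo"
    · have hb : pvIsHeader (PySem.Str.strip s) = true := by simp [pvIsHeader, hh]
      rw [if_pos hh, if_pos hb, ih (d.insert h acc) (PySem.Str.strip s) []]
      conv_rhs => rw [pvGo]
      simp [hb]
    · have hb : pvIsHeader (PySem.Str.strip s) = false := by simp [pvIsHeader]; tauto
      rw [if_neg hh, if_neg (by simp [hb] : ¬ pvIsHeader (PySem.Str.strip s) = true)]
      by_cases he : PySem.Str.strip s ≠ ""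
      · rw [if_pos he]
        show ((t.foldl pvStepA ((d.insert h acc).modify h [] (· ++ [PySem.Str.strip s]), some h)).1 = _)
        rw [PySem.Dict.modify, PySem.Dict.getD_insert_self, PySem.Dict.insert_insert_self,
          ih d h (acc ++ [PySem.Str.strip s])]
        simp [he]
      · rw [if_neg he, ih d h acc]
        simp at he
        simp [he]

-- A's loop before any header was seen equals B's whole scan.
theorem pvL1 : ∀ (ls : List String) (d : PySem.Dict String (List String)),
    (ls.foldl pvStepA (d, none)).1 = pvGo (ls.map PySem.Str.strip) d := by
  intro ls
  induction ls with
  | nil => intro d; simp [pvGo]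
  | cons s t ih =>
    intro d
    simp only [List.foldl_cons, List.map_cons, pvStepA]
    by_cases hh : PySem.Str.strip s = "Shell" ∨ PySem.Str.strip s = "SUID" ∨ PySem.Str.strip s = "Sudo"
    · have hb : pvIsHeader (PySem.Str.strip s) = true := by simp [pvIsHeader, hh]
      rw [if_pos hh, pvL2 t d (PySem.Str.strip s) []]
      conv_rhs => rw [pvGo]
      simp [hb]
    · have hb : pvIsHeader (PySem.Str.strip s) = false := by simp [pvIsHeader]; tauto
      rw [if_neg hh]
      have : (if PySem.Str.strip s ≠ "" then
          (match ((d : PySem.Dict String (List String)), (none : Option String)).2 with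
            | some c => (d.modify c [] (· ++ [PySem.Str.strip s]), (none : Option String))
            | none => (d, none))
          else (d, none)) = (d, none) := by split <;> rfl
      rw [this, ih d]
      conv_rhs => rw [pvGo]
      simp [hb]

-- ===== VERDICT (by name: the statement is the Claim_ definition above) =====
theorem parse_exploit_info_spec : Claim_equal_parse_exploit_info := by
  intro s _
  unfold Spec_parse_exploit_info parse_exploit_info parse_exploit_info_alt
  exact congrArg PySem.Dict.items (pvL1 ((PySem.Str.split? s "\n").getD []) PySem.Dict.empty)
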